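-- pv_equiv track=rewrite | github.com/jh000107/CS111 | CS PS 족보/problemset7(Chan Sol Park)/ps7pr4.py | max_day
-- ===== SOURCE A (Python) =====
-- def max_day(prices):
--     """gets the maximum value in the list and the day in which
--        the value is in"""
--     m = prices[0]
--     count = 0
--     for x in prices:
--         if x > m:
--             count = count  + 1
--             m = x
--     return (m, count)
-- ===== SOURCE B (Python) =====
-- def max_day(prices):
--     """gets the maximum value in the list and the day in which
--        the value is in"""
--     running = []
--     m = None
--     for x in prices:
--         if m is None or x > m:
--             m = x
--         running.append(m)
--     count = 0
--     for prev, cur in zip(running, running[1:]):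
--         if cur > prev:
--             count += 1
--     return (running[-1], count)
-- ===== Notes on version B (the rewrite author's own statement) =====
-- stated objective: alternative
-- what changed: Replaces A's single fused max-and-count accumulator loop by a two-phase decomposition: first build the prefix-maximum table in one pass, then count strict increases between adjacent table entries in a separate zip scan; the result is (last table entry, number of increases).
import Mathlib
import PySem

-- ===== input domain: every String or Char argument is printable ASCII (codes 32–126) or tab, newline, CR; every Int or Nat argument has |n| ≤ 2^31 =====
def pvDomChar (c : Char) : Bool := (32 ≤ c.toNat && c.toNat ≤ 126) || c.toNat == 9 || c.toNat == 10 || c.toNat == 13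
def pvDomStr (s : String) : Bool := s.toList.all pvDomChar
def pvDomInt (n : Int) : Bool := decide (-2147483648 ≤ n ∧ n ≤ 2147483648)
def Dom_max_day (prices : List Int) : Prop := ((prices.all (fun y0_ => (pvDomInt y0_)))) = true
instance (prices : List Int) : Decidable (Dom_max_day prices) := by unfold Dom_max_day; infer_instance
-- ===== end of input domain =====

-- B rebuilds the answer in two phases (prefix-maximum table, then a zip scan counting strict
-- increases) instead of A's fused accumulator loop; objective: alternative decomposition, same cost.


-- ===== PORT A =====
-- m = prices[0] raises IndexError on []; that input is excluded by Pre_, the [] branch is junk.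
def max_day (prices : List Int) : Int × Int :=
  match prices with
  | [] => (0, 0)
  | p0 :: _ =>
    prices.foldl (fun (s : Int × Int) x => if x > s.1 then (x, s.2 + 1) else s) (p0, 0)

-- ===== PORT B =====
-- loop body: if m is None or x > m: m = x; running.append(m)
def altStep (s : List Int × Option Int) (x : Int) : List Int × Option Int :=
  match s.2 with
  | none => (s.1 ++ [x], some x)
  | some m => let m' := if x > m then x else m; (s.1 ++ [m'], some m')

-- running[1:] is List.drop 1 (exact for a slice from 1); running[-1] raises IndexError on [],
-- excluded by Pre_, the none branch is junk.
def max_day_alt (prices : List Int) : Int × Int :=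
  let running := (prices.foldl altStep ([], none)).1
  let count := (running.zip (running.drop 1)).foldl
      (fun (c : Int) (p : Int × Int) => if p.2 > p.1 then c + 1 else c) 0
  match running.getLast? with
  | none => (0, 0)
  | some last => (last, count)

-- ===== PRECONDITION & SPEC =====
-- prices[0] (A) and running[-1] (B) raise IndexError on the empty list.
def Pre_max_day (prices : List Int) : Prop := prices ≠ []
instance (prices : List Int) : Decidable (Pre_max_day prices) := by unfold Pre_max_day; infer_instance
def pvWitness_max_day : List Int := [3, 1, 4, 1, 5]

def Spec_max_day (prices : List Int) (out : Int × Int) : Prop := out = max_day_alt prices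
instance (prices : List Int) (out : Int × Int) : Decidable (Spec_max_day prices out) := by unfold Spec_max_day; infer_instance

-- ===== CLAIM (what is proved, stated in full; the proofs are below) =====
def Claim_equal_max_day : Prop := ∀ (prices : List Int), Dom_max_day prices → Pre_max_day prices → Spec_max_day prices (max_day prices)

-- ===== LEMMAS AND PROOFS =====

/-- The prefix-maximum tail: the running-max values produced after seeing each element of `xs`,
starting from current max `m`. -/
def pref (m : Int) : List Int → List Int
  | [] => []
  | x :: xs => let m' := if x > m then x else m; m' :: pref m' xs

/-- Number of strict new-max discoveries in `xs` given current max `m`. -/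
def cnt (m : Int) : List Int → Int
  | [] => 0
  | x :: xs => if x > m then 1 + cnt x xs else cnt m xs

theorem fold_pref (xs : List Int) : ∀ (acc : List Int) (m : Int),
    xs.foldl altStep (acc, some m) = (acc ++ pref m xs, some ((pref m xs).getLastD m)) := by
  induction xs with
  | nil => intro acc m; simp [pref]
  | cons x xs ih =>
    intro acc m
    simp only [List.foldl_cons, altStep, pref, ih, List.append_assoc, List.getLastD_cons]
    simp

theorem fold_A (xs : List Int) : ∀ (m c : Int),
    xs.foldl (fun (s : Int × Int) x => if x > s.1 then (x, s.2 + 1) else s) (m, c)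
      = ((pref m xs).getLastD m, c + cnt m xs) := by
  induction xs with
  | nil => intro m c; simp [pref, cnt]
  | cons x xs ih =>
    intro m c
    by_cases h : x > m
    · simp only [List.foldl_cons, pref, cnt, h, if_true, List.getLastD_cons, ih]
      ring_nf
    · simp only [List.foldl_cons, pref, cnt, h, if_false, List.getLastD_cons, ih]

theorem fold_zip (xs : List Int) : ∀ (m : Int) (c : Int),
    ((m :: pref m xs).zip (pref m xs)).foldl
        (fun (c : Int) (p : Int × Int) => if p.2 > p.1 then c + 1 else c) c
      = c + cnt m xs := by
  induction xs with
  | nil => intro m c; simp [pref, cnt]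
  | cons x xs ih =>
    intro m c
    by_cases h : x > m
    · simp only [pref, cnt, h, if_true, List.zip_cons_cons, List.foldl_cons, ih]
      ring_nf
    · simp only [pref, cnt, h, if_false, List.zip_cons_cons, List.foldl_cons, ih]
      rw [if_neg (lt_irrefl m)]

-- ===== VERDICT (by name: the statement is the Claim_ definition above) =====
theorem max_day_spec : Claim_equal_max_day := by
  intro prices _ hpre
  unfold Spec_max_day
  match prices, hpre with
  | p0 :: rest, _ =>
    show max_day (p0 :: rest) = max_day_alt (p0 :: rest)
    unfold max_day max_day_alt
    simp only [List.foldl_cons, altStep]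
    rw [if_neg (lt_irrefl p0), fold_A, fold_pref]
    simp only [List.nil_append, List.singleton_append, List.drop_succ_cons, List.drop_zero]
    rw [fold_zip]
    simp [List.getLast?_cons, List.getLastD_eq_getLast?]
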